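-- pv_equiv track=rewrite | github.com/ben18mk/S_Lang_Encoder | Godel2Slang.py | get_line_abc
-- ===== SOURCE A (Python) =====
-- def get_line_abc(line_code):
--     def unpair(pair):
--         x = y = 0
--
--         pair += 1
--         while pair % 2 == 0:
--             x += 1
--             pair //= 2
--
--         pair -= 1
--         y = pair // 2
--
--         return x, y
--
--     a, bc = unpair(line_code)
--     b, c = unpair(bc)
--
--     return a, b, c
-- ===== SOURCE B (Python) =====
-- def get_line_abc(line_code):
--     def unpair(pair):
--         # binary-lifting count of the factors of 2 in pair+1 (constant number of steps)
--         m = pair + 1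
--         x = 0
--         for s in (16, 8, 4, 2, 1):
--             if m % (1 << s) == 0:
--                 m //= 1 << s
--                 x += s
--         return x, (m - 1) // 2
--
--     a, bc = unpair(line_code)
--     b, c = unpair(bc)
--     return a, b, c
-- ===== Notes on version B (the rewrite author's own statement) =====
-- stated objective: alternative
-- what changed: The data-dependent while-loop that strips factors of 2 one at a time is replaced by a fixed five-step binary lifting (dividing by 2^16, 2^8, 2^4, 2^2, 2^1 when divisible), so the trailing-zero count is found by binary search instead of iteration.
-- outside the precondition, e.g. on get_line_abc(-1): A does not finish within the time limit, B returns (31, 31, -1); on get_line_abc(-2): A does not finish within the time limit, B returns (0, 31, -1)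
import Mathlib
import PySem

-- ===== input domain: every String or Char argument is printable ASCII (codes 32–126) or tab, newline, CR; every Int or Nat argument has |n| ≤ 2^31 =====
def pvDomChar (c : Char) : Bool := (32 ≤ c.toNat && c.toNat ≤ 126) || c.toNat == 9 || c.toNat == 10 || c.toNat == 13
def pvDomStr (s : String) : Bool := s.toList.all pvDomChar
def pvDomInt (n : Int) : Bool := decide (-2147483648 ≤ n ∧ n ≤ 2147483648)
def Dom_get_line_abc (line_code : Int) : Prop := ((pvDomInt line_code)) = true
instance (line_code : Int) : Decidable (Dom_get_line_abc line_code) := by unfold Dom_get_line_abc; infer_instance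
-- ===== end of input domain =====

-- B replaces A's one-bit-at-a-time halving loop by a fixed five-step binary lifting
-- (divide by 2^16, 2^8, 2^4, 2^2, 2^1 when divisible); same return value on Pre_.

-- ===== PORT A =====
-- termination measure lemma for the while loop (cited in decreasing_by)
theorem pvHalveLt (pair : Int) (h0 : pair ≠ 0) (h2 : (2:Int) ∣ pair) :
    (PySem.Int.floordiv pair 2).natAbs < pair.natAbs := by
  obtain ⟨c, rfl⟩ := h2
  rw [PySem.Int.floordiv_eq_ediv_of_pos (by norm_num),
      Int.mul_ediv_cancel_left c (by norm_num)]
  omega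

-- while pair % 2 == 0: x += 1; pair //= 2 — the extra 'pair ≠ 0' test is ONLY a totality
-- guard: at pair = 0 Python loops forever, and Pre_ excludes exactly those inputs.
def unpairLoopA (x pair : Int) : Int × Int :=
  if h : PySem.Int.mod pair 2 = 0 ∧ pair ≠ 0 then
    unpairLoopA (x + 1) (PySem.Int.floordiv pair 2)
  else (x, pair)
termination_by pair.natAbs
decreasing_by
  exact pvHalveLt pair h.2 ((PySem.Int.mod_eq_zero_iff_dvd pair 2).mp h.1)

def unpairA (pair : Int) : Int × Int :=
  let r := unpairLoopA 0 (pair + 1)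
  (r.1, PySem.Int.floordiv (r.2 - 1) 2)

def get_line_abc (line_code : Int) : Int × Int × Int :=
  let abc := unpairA line_code
  let bc := unpairA abc.2
  (abc.1, bc.1, bc.2)

-- ===== PORT B =====
-- one step of Source B's for-loop body; '1 << s' is ported as 2^s (exact: s ≥ 0)
def unpairStepB (mx : Int × Int) (s : Nat) : Int × Int :=
  if PySem.Int.mod mx.1 ((2:Int) ^ s) = 0 then
    (PySem.Int.floordiv mx.1 ((2:Int) ^ s), mx.2 + (s : Int))
  else mx

def unpairB (pair : Int) : Int × Int :=
  let mx := [16, 8, 4, 2, 1].foldl unpairStepB (pair + 1, 0)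
  (mx.2, PySem.Int.floordiv (mx.1 - 1) 2)

def get_line_abc_alt (line_code : Int) : Int × Int × Int :=
  let abc := unpairB line_code
  let bc := unpairB abc.2
  (abc.1, bc.1, bc.2)

-- ===== PRECONDITION & SPEC =====
-- Pre_ excludes exactly the inputs where A never returns: Python's while loop diverges
-- iff line_code = -1 (pair becomes 0) or line_code + 1 = -2^k (the inner unpair gets -1).
def Pre_get_line_abc (line_code : Int) : Prop :=
  line_code + 1 ≠ 0 ∧ ∀ k < 33, line_code + 1 ≠ -((2:Int) ^ k)
instance (line_code : Int) : Decidable (Pre_get_line_abc line_code) := by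
  unfold Pre_get_line_abc; infer_instance

def pvWitness_get_line_abc : Int := 11

def Spec_get_line_abc (line_code : Int) (out : Int × Int × Int) : Prop :=
  out = get_line_abc_alt line_code
instance (line_code : Int) (out : Int × Int × Int) : Decidable (Spec_get_line_abc line_code out) := by
  unfold Spec_get_line_abc; infer_instance

-- ===== CLAIM (what is proved, stated in full; the proofs are below) =====
def Claim_equal_get_line_abc : Prop :=
  ∀ (line_code : Int), Dom_get_line_abc line_code → Pre_get_line_abc line_code →
    Spec_get_line_abc line_code (get_line_abc line_code)

-- ===== LEMMAS AND PROOFS =====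

theorem pvMod_odd (o : Int) (ho : Odd o) : PySem.Int.mod o 2 = 1 := by
  rw [PySem.Int.mod_eq_emod_of_pos (by norm_num)]
  exact Int.odd_iff.mp ho

theorem pvFloordiv_pow (s : Nat) (c : Int) :
    PySem.Int.floordiv ((2:Int) ^ s * c) (2 ^ s) = c := by
  rw [PySem.Int.floordiv_eq_ediv_of_pos (by positivity)]
  exact Int.mul_ediv_cancel_left c (by positivity)

-- A's loop on 2^k * o (o odd) strips exactly k factors of 2
theorem pvLoopA (k : Nat) (o x : Int) (ho : Odd o) :
    unpairLoopA x ((2:Int) ^ k * o) = (x + k, o) := by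
  induction k generalizing x with
  | zero =>
      rw [pow_zero, one_mul, unpairLoopA,
          dif_neg (by rw [pvMod_odd o ho]; simp)]
      simp
  | succ k ih =>
      rw [unpairLoopA]
      have hne : (2:Int) ^ (k + 1) * o ≠ 0 := by
        have : o ≠ 0 := by rintro rfl; simp [Int.odd_iff] at ho
        positivity
      have hdvd : (2:Int) ∣ 2 ^ (k + 1) * o := ⟨2 ^ k * o, by ring⟩
      have hmod : PySem.Int.mod ((2:Int) ^ (k + 1) * o) 2 = 0 :=
        (PySem.Int.mod_eq_zero_iff_dvd _ 2).mpr hdvd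
      have hdiv : PySem.Int.floordiv ((2:Int) ^ (k + 1) * o) 2 = 2 ^ k * o := by
        have : (2:Int) ^ (k + 1) * o = 2 ^ 1 * (2 ^ k * o) := by ring
        rw [this]
        exact pvFloordiv_pow 1 _
      rw [dif_pos ⟨hmod, hne⟩, hdiv, ih (x + 1)]
      simp only [Prod.mk.injEq, and_true]
      push_cast
      ring

-- divisibility of 2^j * o (o odd) by 2^s is exactly s ≤ j
theorem pvModPow (s j : Nat) (o : Int) (ho : Odd o) :
    PySem.Int.mod ((2:Int) ^ j * o) (2 ^ s) = 0 ↔ s ≤ j := by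
  rw [PySem.Int.mod_eq_zero_iff_dvd]
  constructor
  · intro hd
    by_contra hlt
    rw [Nat.not_le] at hlt
    have hsplit : (2:Int) ^ s = 2 ^ j * 2 ^ (s - j) := by
      rw [← pow_add]; congr 1; omega
    rw [hsplit] at hd
    have h2 : (2:Int) ^ (s - j) ∣ o :=
      (mul_dvd_mul_iff_left (a := (2:Int) ^ j) (by positivity)).mp hd
    obtain ⟨d, hd⟩ := dvd_trans (dvd_pow_self 2 (by omega : s - j ≠ 0)) h2
    obtain ⟨c, hc⟩ := id ho
    omega
  · intro hle
    exact Dvd.dvd.mul_right (pow_dvd_pow 2 hle) o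

theorem pvStepB (s j : Nat) (o x : Int) (ho : Odd o) :
    unpairStepB ((2:Int) ^ j * o, x) s =
      if s ≤ j then ((2:Int) ^ (j - s) * o, x + s) else ((2:Int) ^ j * o, x) := by
  unfold unpairStepB
  by_cases h : s ≤ j
  · rw [if_pos ((pvModPow s j o ho).mpr h), if_pos h]
    have : (2:Int) ^ j * o = 2 ^ s * (2 ^ (j - s) * o) := by
      rw [← mul_assoc, ← pow_add]; congr 2; omega
    rw [this, pvFloordiv_pow]
  · rw [if_neg (fun hmod => h ((pvModPow s j o ho).mp hmod)), if_neg h]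

-- the remaining exponent after Source B's loop, computed on the exponent alone
def pvR (L : List Nat) (j : Nat) : Nat :=
  L.foldl (fun r s => if s ≤ r then r - s else r) j

theorem pvR_le (L : List Nat) (j : Nat) : pvR L j ≤ j := by
  induction L generalizing j with
  | nil => simp [pvR]
  | cons s L ih =>
      by_cases h : s ≤ j
      · calc pvR (s :: L) j = pvR L (j - s) := by simp [pvR, h]
          _ ≤ j - s := ih _
          _ ≤ j := by omega
      · calc pvR (s :: L) j = pvR L j := by simp [pvR, h]
          _ ≤ j := ih _

theorem pvFoldB (L : List Nat) (j : Nat) (o x : Int) (ho : Odd o) :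
    L.foldl unpairStepB ((2:Int) ^ j * o, x) =
      ((2:Int) ^ pvR L j * o, x + ((j - pvR L j : Nat) : Int)) := by
  induction L generalizing j x with
  | nil => simp [pvR]
  | cons s L ih =>
      rw [List.foldl_cons, pvStepB s j o x ho]
      by_cases h : s ≤ j
      · rw [if_pos h, ih (j - s) (x + s)]
        have hR : pvR (s :: L) j = pvR L (j - s) := by simp [pvR, h]
        have hle := pvR_le L (j - s)
        rw [hR]
        simp only [Prod.mk.injEq, true_and]
        omega
      · rw [if_neg h, ih j x]
        have hR : pvR (s :: L) j = pvR L j := by simp [pvR, h]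
        rw [hR]

theorem pvR_lift (j : Nat) (h : j ≤ 31) : pvR [16, 8, 4, 2, 1] j = 0 := by
  interval_cases j <;> rfl

-- both unpairs agree on any argument whose successor is 2^k * o, o odd, k ≤ 31
theorem pvUnpairA_eq (pair : Int) (k : Nat) (o : Int) (ho : Odd o)
    (h : pair + 1 = 2 ^ k * o) :
    unpairA pair = ((k : Int), PySem.Int.floordiv (o - 1) 2) := by
  simp [unpairA, h, pvLoopA k o 0 ho]

theorem pvUnpairB_eq (pair : Int) (k : Nat) (o : Int) (hk : k ≤ 31) (ho : Odd o)
    (h : pair + 1 = 2 ^ k * o) :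
    unpairB pair = ((k : Int), PySem.Int.floordiv (o - 1) 2) := by
  simp only [unpairB, h, pvFoldB [16, 8, 4, 2, 1] k o 0 ho, pvR_lift k hk]
  simp

-- every nonzero integer of magnitude ≤ 2^31 + 1 is 2^k * o with o odd and k ≤ 31
theorem pvDecomp (m : Int) (hm : m ≠ 0) (hb : m.natAbs ≤ 2 ^ 31 + 1) :
    ∃ (k : Nat) (o : Int), k ≤ 31 ∧ Odd o ∧ m = 2 ^ k * o := by
  obtain ⟨k, n, hn, habs⟩ := Nat.exists_eq_two_pow_mul_odd (by omega : m.natAbs ≠ 0)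
  have hk : k ≤ 31 := by
    by_contra hgt
    have h1 : 2 ^ 32 ≤ 2 ^ k := Nat.pow_le_pow_right (by norm_num) (by omega)
    have h2 : 2 ^ k ≤ 2 ^ k * n := Nat.le_mul_of_pos_right _ (by
      rcases Nat.eq_zero_or_pos n with h | h
      · simp [h, Nat.odd_iff] at hn
      · exact h)
    rw [← habs] at h2
    have : (2:Nat) ^ 32 = 4294967296 := by norm_num
    omega
  rcases Int.natAbs_eq m with hme | hme
  · exact ⟨k, (n : Int), hk, by exact_mod_cast hn, by
      rw [hme, habs]; push_cast; ring⟩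
  · refine ⟨k, -(n : Int), hk, ?_, by rw [hme, habs]; push_cast; ring⟩
    exact Odd.neg (by exact_mod_cast hn)

-- ===== VERDICT (by name: the statement is the Claim_ definition above) =====
theorem get_line_abc_spec : Claim_equal_get_line_abc := by
  intro lc hdom hpre
  obtain ⟨hne, hpow⟩ := hpre
  have hdom' : -2147483648 ≤ lc ∧ lc ≤ 2147483648 := by
    simpa [Dom_get_line_abc, pvDomInt] using hdom
  obtain ⟨k, o, hk, ho, hko⟩ := pvDecomp (lc + 1) hne (by omega)
  obtain ⟨c, hc⟩ := id ho
  -- the odd part is not -1 (that would make lc + 1 = -2^k, excluded by Pre_)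
  have honeg : o ≠ -1 := by
    rintro rfl
    exact hpow k (by omega) (by rw [hko]; ring)
  -- first unpair value: bc = (o - 1) // 2 = c
  have hbc : PySem.Int.floordiv (o - 1) 2 = c := by
    rw [show o - 1 = 2 * c by omega]
    rw [PySem.Int.floordiv_eq_ediv_of_pos (by norm_num)]
    exact Int.mul_ediv_cancel_left c (by norm_num)
  -- decompose bc + 1 = c + 1 for the inner unpair
  have hc1ne : c + 1 ≠ 0 := by
    intro h; exact honeg (by omega)
  have hc1b : (c + 1).natAbs ≤ 2 ^ 31 + 1 := by
    have h1 : ((2:Int) ^ k * o).natAbs = 2 ^ k * o.natAbs := by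
      simp [Int.natAbs_mul, Int.natAbs_pow]
    have h2 : o.natAbs ≤ (lc + 1).natAbs := by
      rw [hko, h1]
      exact Nat.le_mul_of_pos_left _ (by positivity)
    have h3 : (lc + 1).natAbs ≤ 2 ^ 31 + 1 := by omega
    have : (2:Nat) ^ 31 = 2147483648 := by norm_num
    omega
  obtain ⟨k2, o2, hk2, ho2, hko2⟩ := pvDecomp (c + 1) hc1ne hc1b
  -- evaluate both sides
  simp only [Spec_get_line_abc, get_line_abc, get_line_abc_alt,
    pvUnpairA_eq lc k o ho hko, pvUnpairB_eq lc k o hk ho hko, hbc,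
    pvUnpairA_eq c k2 o2 ho2 hko2, pvUnpairB_eq c k2 o2 hk2 ho2 hko2]
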